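-- pv_equiv track=rewrite | github.com/yeojingi/rosalind-solutions | Textbook/ba1i.py | GenerateMismatchedWordsWithD
-- ===== SOURCE A (Python) =====
-- def GenerateMismatchedWordsWithD(kmer, d):
--   AAs = ['A', 'G', 'C', 'T']
--   mismatcheds = []
--
--   def rec(kmer, i, d):
--     if d == 0:
--       mismatcheds.append(kmer)
--       return
--     if i >= len(kmer):
--       mismatcheds.append(kmer)
--       return
--
--     cur = kmer[i]
--     for aa in AAs:
--       if aa == cur:
--         rec(kmer, i+1, d)
--       else:
--         newKmer = kmer[:i] + aa + kmer[i+1:]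
--         rec(newKmer, i+1, d-1)
--
--   rec(kmer, 0, d)
--
--   return mismatcheds
-- ===== SOURCE B (Python) =====
-- def GenerateMismatchedWordsWithD(kmer, d):
--   AAs = ['A', 'G', 'C', 'T']
--   result = []
--   stack = [(kmer, 0, d)]
--   while stack:
--     km, i, dd = stack.pop()
--     if dd == 0 or i >= len(km):
--       result.append(km)
--       continue
--     cur = km[i]
--     # push children in reverse so they pop in AAs order
--     for aa in reversed(AAs):
--       if aa == cur:
--         stack.append((km, i + 1, dd))
--       else:
--         stack.append((km[:i] + aa + km[i + 1:], i + 1, dd - 1))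
--   return result
-- ===== Notes on version B (the rewrite author's own statement) =====
-- stated objective: alternative
-- what changed: Replaced A's recursive inner closure that mutates an enclosing list with an iterative explicit-stack DFS loop (children pushed in reverse so they pop in A's order), collecting results in a local list.
import Mathlib
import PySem

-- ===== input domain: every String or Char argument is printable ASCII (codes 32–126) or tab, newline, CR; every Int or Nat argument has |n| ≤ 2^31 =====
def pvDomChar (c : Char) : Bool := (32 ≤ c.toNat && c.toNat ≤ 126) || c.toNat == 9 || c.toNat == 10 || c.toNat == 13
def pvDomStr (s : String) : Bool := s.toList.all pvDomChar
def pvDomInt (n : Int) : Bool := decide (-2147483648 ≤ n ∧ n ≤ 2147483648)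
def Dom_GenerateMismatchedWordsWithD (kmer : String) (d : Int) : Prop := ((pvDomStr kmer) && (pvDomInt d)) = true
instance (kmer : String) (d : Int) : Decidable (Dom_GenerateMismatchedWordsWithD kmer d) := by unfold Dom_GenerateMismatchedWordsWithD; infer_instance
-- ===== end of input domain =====

-- B replaces A's recursive closure mutating an enclosing list by an iterative explicit-stack DFS
-- (children pushed in reverse so they pop in A's order); objective: alternative decomposition.

-- ===== PORT A =====
-- A's rec(kmer, i, d) is ported with the index i represented as the split kmer = pre ++ suf,
-- pre = kmer[:i], suf = kmer[i:] (so cur = kmer[i] is suf's head, kmer[i+1:] is its tail, and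
-- newKmer = kmer[:i] + aa + kmer[i+1:] is pre ++ [aa] ++ tail); this is exact because rec only
-- uses 0 ≤ i ≤ len(kmer). The mutated list mismatcheds is the accumulator acc.

mutual
def pvARec (pre suf : List Char) (d : Int) (acc : List (List Char)) : List (List Char) :=
  if d = 0 then acc ++ [pre ++ suf]
  else
    match suf with
    | [] => acc ++ [pre ++ suf]
    | cur :: rest => pvAFor pre cur rest d ['A', 'G', 'C', 'T'] acc
termination_by (suf.length, 5)
decreasing_by apply Prod.Lex.right; decide

def pvAFor (pre : List Char) (cur : Char) (rest : List Char) (d : Int)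
    (aas : List Char) (acc : List (List Char)) : List (List Char) :=
  match aas with
  | [] => acc
  | aa :: more =>
      let acc' := if aa = cur then pvARec (pre ++ [cur]) rest d acc
                  else pvARec (pre ++ [aa]) rest (d - 1) acc
      pvAFor pre cur rest d more acc'
termination_by (rest.length + 1, aas.length)
decreasing_by all_goals first
  | (apply Prod.Lex.left; omega)
  | (apply Prod.Lex.right; simp)
end

def GenerateMismatchedWordsWithD (kmer : String) (d : Int) : List String :=
  (pvARec [] kmer.toList d []).map String.ofList

-- ===== PORT B =====
-- pvWeight/pvStackW and the two lemmas below exist only to justify termination of the stack loop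
def pvWeight (f : List Char × Nat × Int) : Nat :=
  if f.2.2 = 0 then 1 else 5 ^ (f.1.length + 1 - f.2.1)

def pvStackW (s : List (List Char × Nat × Int)) : Nat := (s.map pvWeight).sum

theorem pvChild_weight (km : List Char) (i : Nat) (dd : Int) (aa : Char) (hi : i < km.length) :
    pvWeight (if aa = km.getD i ' ' then (km, i + 1, dd)
      else (km.take i ++ [aa] ++ km.drop (i + 1), i + 1, dd - 1)) ≤ 5 ^ (km.length - i) := by
  have hlen : (km.take i ++ [aa] ++ km.drop (i + 1)).length = km.length := by simp; omega
  by_cases h : aa = km.getD i ' ' <;>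
    simp only [h, ite_true, ite_false, pvWeight, hlen] <;> split_ifs <;>
      first
        | exact Nat.one_le_pow _ _ (by omega)
        | (apply Nat.pow_le_pow_right (by omega) (by omega))

theorem pvBLoop_dec (km : List Char) (i : Nat) (dd : Int)
    (rest : List (List Char × Nat × Int)) (h0 : ¬ dd = 0) (hlen : ¬ km.length ≤ i) :
    pvStackW (['T', 'C', 'G', 'A'].foldl (fun st aa =>
        (if aa = km.getD i ' ' then (km, i + 1, dd)
         else (km.take i ++ [aa] ++ km.drop (i + 1), i + 1, dd - 1)) :: st) rest)
      < pvStackW ((km, i, dd) :: rest) := by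
  have hi : i < km.length := by omega
  have h1 : (1:Nat) ≤ 5 ^ (km.length - i) := Nat.one_le_pow _ _ (by omega)
  have hT := pvChild_weight km i dd 'T' hi
  have hC := pvChild_weight km i dd 'C' hi
  have hG := pvChild_weight km i dd 'G' hi
  have hA := pvChild_weight km i dd 'A' hi
  simp only [List.foldl, pvStackW, List.map_cons, List.sum_cons]
  have hw : pvWeight (km, i, dd) = 5 ^ (km.length - i) * 5 := by
    simp only [pvWeight, if_neg h0]
    rw [show km.length + 1 - i = (km.length - i) + 1 by omega, pow_succ]
  rw [hw]
  omega

-- the while-stack loop of Source B: Python pops from the list's end; here the stack's head is its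
-- top, so Python's append is a cons, and the for-loop over reversed(AAs) is a foldl consing the
-- four children. Slices km[:i], km[i+1:] are take/drop and cur = km[i] is getD, all exact since
-- 0 ≤ i < len(km) in that branch.
def pvBLoop (stack : List (List Char × Nat × Int)) (res : List (List Char)) : List (List Char) :=
  match stack with
  | [] => res
  | (km, i, dd) :: rest =>
    if dd = 0 then pvBLoop rest (res ++ [km])
    else if km.length ≤ i then pvBLoop rest (res ++ [km])
    else
      let cur := km.getD i ' '
      pvBLoop (['T', 'C', 'G', 'A'].foldl (fun st aa =>
          (if aa = cur then (km, i + 1, dd)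
           else (km.take i ++ [aa] ++ km.drop (i + 1), i + 1, dd - 1)) :: st) rest) res
termination_by pvStackW stack
decreasing_by
  · simp_all [pvStackW, pvWeight]
  · rename_i h0 _hlen
    simp [pvStackW, pvWeight, if_neg h0]
  · exact pvBLoop_dec km i dd rest (by assumption) (by assumption)


def GenerateMismatchedWordsWithD_alt (kmer : String) (d : Int) : List String :=
  (pvBLoop [(kmer.toList, 0, d)] []).map String.ofList

-- ===== PRECONDITION & SPEC =====
-- A raises no exception on any input (d is only tested against 0), so there is no Pre_.
def Spec_GenerateMismatchedWordsWithD (kmer : String) (d : Int) (out : List String) : Prop := out = GenerateMismatchedWordsWithD_alt kmer d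
instance (kmer : String) (d : Int) (out : List String) : Decidable (Spec_GenerateMismatchedWordsWithD kmer d out) := by unfold Spec_GenerateMismatchedWordsWithD; infer_instance

-- ===== CLAIM (what is proved, stated in full; the proofs are below) =====
def Claim_equal_GenerateMismatchedWordsWithD : Prop := ∀ (kmer : String) (d : Int), Dom_GenerateMismatchedWordsWithD kmer d → Spec_GenerateMismatchedWordsWithD kmer d (GenerateMismatchedWordsWithD kmer d)

-- ===== LEMMAS AND PROOFS =====
def pvAShiftRec (pre suf : List Char) (d : Int) (acc : List (List Char)) : Prop :=
  ∀ pfx, pvARec pre suf d (pfx ++ acc) = pfx ++ pvARec pre suf d acc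

def pvAShiftFor (pre : List Char) (cur : Char) (rest : List Char) (d : Int)
    (aas : List Char) (acc : List (List Char)) : Prop :=
  ∀ pfx, pvAFor pre cur rest d aas (pfx ++ acc) = pfx ++ pvAFor pre cur rest d aas acc

theorem pvAFor_shift (pre : List Char) (cur : Char) (rest : List Char) (d : Int)
    (aas : List Char) (acc : List (List Char)) : pvAShiftFor pre cur rest d aas acc := by
  refine pvAFor.induct pvAShiftRec pvAShiftFor ?_ ?_ ?_ ?_ ?_ pre cur rest d aas acc
  · intro pre suf acc pfx
    rw [pvARec.eq_def, pvARec.eq_def]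
    simp
  · intro pre d acc h pfx
    rw [pvARec.eq_def, pvARec.eq_def]
    simp [h]
  · intro pre d acc h cur rest ih pfx
    rw [pvARec.eq_def, pvARec.eq_def]
    simp only [if_neg h]
    exact ih pfx
  · intro pre cur rest d acc pfx
    rw [pvAFor.eq_def, pvAFor.eq_def]
  · intro pre cur rest d acc aa more accp ihr1 ihr2 ihf pfx
    rw [pvAFor.eq_def, pvAFor.eq_def]
    simp only [accp] at ihf
    by_cases hc : aa = cur
    · simp only [hc, ite_true, dite_true] at ihf ⊢
      rw [ihr1 pfx, ihf pfx]
    · simp only [hc, ite_false, dite_false] at ihf ⊢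
      rw [ihr2 pfx, ihf pfx]

theorem pvARec_shift (pre suf : List Char) (d : Int) (acc : List (List Char)) :
    pvAShiftRec pre suf d acc := by
  refine pvARec.induct pvAShiftRec pvAShiftFor ?_ ?_ ?_ ?_ ?_ pre suf d acc
  · intro pre suf acc pfx
    rw [pvARec.eq_def, pvARec.eq_def]
    simp
  · intro pre d acc h pfx
    rw [pvARec.eq_def, pvARec.eq_def]
    simp [h]
  · intro pre d acc h cur rest ih pfx
    rw [pvARec.eq_def, pvARec.eq_def]
    simp only [if_neg h]
    exact ih pfx
  · intro pre cur rest d acc pfx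
    rw [pvAFor.eq_def, pvAFor.eq_def]
  · intro pre cur rest d acc aa more accp ihr1 ihr2 ihf pfx
    rw [pvAFor.eq_def, pvAFor.eq_def]
    simp only [accp] at ihf
    by_cases hc : aa = cur
    · simp only [hc, ite_true, dite_true] at ihf ⊢
      rw [ihr1 pfx, ihf pfx]
    · simp only [hc, ite_false, dite_false] at ihf ⊢
      rw [ihr2 pfx, ihf pfx]

theorem pvARec_acc (pre suf : List Char) (d : Int) (acc : List (List Char)) :
    pvARec pre suf d acc = acc ++ pvARec pre suf d [] := by
  have h := pvARec_shift pre suf d [] acc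
  simpa using h

theorem pvAFor_acc (pre : List Char) (cur : Char) (rest : List Char) (d : Int)
    (aas : List Char) (acc : List (List Char)) :
    pvAFor pre cur rest d aas acc = acc ++ pvAFor pre cur rest d aas [] := by
  have h := pvAFor_shift pre cur rest d aas [] acc
  simpa using h

theorem pvAFor_cons (pre : List Char) (cur : Char) (rest : List Char) (d : Int)
    (aa : Char) (more : List Char) (acc : List (List Char)) :
    pvAFor pre cur rest d (aa :: more) acc
      = acc ++ (if aa = cur then pvARec (pre ++ [cur]) rest d []
                else pvARec (pre ++ [aa]) rest (d - 1) [])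
        ++ pvAFor pre cur rest d more [] := by
  rw [pvAFor.eq_def]
  simp only
  by_cases hc : aa = cur <;>
    simp only [hc, ite_true, ite_false] <;>
      rw [pvAFor_acc, pvARec_acc, List.append_assoc]

def pvOutF (f : List Char × Nat × Int) : List (List Char) :=
  pvARec (f.1.take f.2.1) (f.1.drop f.2.1) f.2.2 []

theorem pvOutF_stop (km : List Char) (i : Nat) (dd : Int)
    (h : dd = 0 ∨ km.length ≤ i) : pvOutF (km, i, dd) = [km] := by
  rcases h with h | h
  · simp only [pvOutF]
    rw [pvARec.eq_def]
    simp [h]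
  · have hd : km.drop i = [] := by simp; omega
    have ht : km.take i = km := List.take_of_length_le h
    simp only [pvOutF, hd, ht]
    rw [pvARec.eq_def]
    split <;> simp

theorem pvOutF_split (km : List Char) (i : Nat) (dd : Int) (h0 : ¬ dd = 0) (hi : i < km.length) :
    pvOutF (km, i, dd)
      = pvOutF (if 'A' = km.getD i ' ' then (km, i + 1, dd)
                else (km.take i ++ ['A'] ++ km.drop (i + 1), i + 1, dd - 1))
      ++ pvOutF (if 'G' = km.getD i ' ' then (km, i + 1, dd)
                else (km.take i ++ ['G'] ++ km.drop (i + 1), i + 1, dd - 1))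
      ++ pvOutF (if 'C' = km.getD i ' ' then (km, i + 1, dd)
                else (km.take i ++ ['C'] ++ km.drop (i + 1), i + 1, dd - 1))
      ++ pvOutF (if 'T' = km.getD i ' ' then (km, i + 1, dd)
                else (km.take i ++ ['T'] ++ km.drop (i + 1), i + 1, dd - 1)) := by
  have hget : km.getD i ' ' = km[i] := by simp [List.getD, List.getElem?_eq_getElem hi]
  have hdropi : km.drop i = km[i] :: km.drop (i + 1) := List.drop_eq_getElem_cons hi
  have hlentake : (km.take i).length = i := by simp; omega
  have htake : km.take (i + 1) = km.take i ++ [km[i]] := by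
    rw [List.take_add_one]
    simp [List.getElem?_eq_getElem hi]
  have hmatch : pvOutF (km, i + 1, dd) = pvARec (km.take i ++ [km[i]]) (km.drop (i + 1)) dd [] := by
    simp only [pvOutF, htake]
  have hchild : ∀ aa : Char,
      pvOutF (km.take i ++ [aa] ++ km.drop (i + 1), i + 1, dd - 1)
        = pvARec (km.take i ++ [aa]) (km.drop (i + 1)) (dd - 1) [] := by
    intro aa
    have hl : (km.take i ++ [aa]).length = i + 1 := by simp [hlentake]
    have h1 : (km.take i ++ [aa] ++ km.drop (i + 1)).take (i + 1) = km.take i ++ [aa] :=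
      List.take_left' hl
    have h2 : (km.take i ++ [aa] ++ km.drop (i + 1)).drop (i + 1) = km.drop (i + 1) :=
      List.drop_left' hl
    simp only [pvOutF, h1, h2]
  have hone : ∀ aa : Char,
      (if aa = km[i] then pvARec (km.take i ++ [km[i]]) (km.drop (i + 1)) dd []
       else pvARec (km.take i ++ [aa]) (km.drop (i + 1)) (dd - 1) [])
      = pvOutF (if aa = km.getD i ' ' then (km, i + 1, dd)
                else (km.take i ++ [aa] ++ km.drop (i + 1), i + 1, dd - 1)) := by
    intro aa
    rw [hget]
    by_cases h : aa = km[i]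
    · simp only [h, ite_true, hmatch]
    · simp only [h, ite_false, hchild]
  conv_lhs => rw [pvOutF]
  simp only
  rw [hdropi, pvARec.eq_def]
  simp only [if_neg h0]
  rw [pvAFor_cons, pvAFor_cons, pvAFor_cons, pvAFor_cons, pvAFor.eq_def]
  simp only [List.nil_append, List.append_nil]
  rw [hone 'A', hone 'G', hone 'C', hone 'T']
  simp [List.append_assoc]

theorem pvBLoop_spec (stack : List (List Char × Nat × Int)) (res : List (List Char)) :
    pvBLoop stack res = res ++ stack.flatMap pvOutF := by
  match stack with
  | [] => rw [pvBLoop.eq_def]; simp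
  | (km, i, dd) :: rest =>
    rw [pvBLoop.eq_def]
    simp only
    by_cases h0 : dd = 0
    · rw [if_pos h0, pvBLoop_spec rest]
      simp [pvOutF_stop km i dd (Or.inl h0)]
    · rw [if_neg h0]
      by_cases hlen : km.length ≤ i
      · rw [if_pos hlen, pvBLoop_spec rest]
        simp [pvOutF_stop km i dd (Or.inr hlen)]
      · rw [if_neg hlen]
        rw [pvBLoop_spec]
        simp only [List.foldl, List.flatMap_cons]
        rw [pvOutF_split km i dd h0 (by omega)]
        simp [List.append_assoc]
termination_by pvStackW stack
decreasing_by
  · simp_all [pvStackW, pvWeight]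
  · simp [pvStackW, pvWeight, if_neg h0]
  · exact pvBLoop_dec km i dd rest h0 hlen

-- ===== VERDICT (by name: the statement is the Claim_ definition above) =====
theorem GenerateMismatchedWordsWithD_spec : Claim_equal_GenerateMismatchedWordsWithD := by
  intro kmer d _
  unfold Spec_GenerateMismatchedWordsWithD GenerateMismatchedWordsWithD GenerateMismatchedWordsWithD_alt
  rw [pvBLoop_spec]
  simp [pvOutF]
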